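-- pv_equiv track=rewrite | github.com/Esteb37/fuzzy-control | data_viewer.py | id_to_array
-- ===== SOURCE A (Python) =====
-- def id_to_array(id_):
--     id_str = str(int(id_))
--
--     i = 0
--     array = []
--     while i < len(id_str):
--         if id_str[i] == '1':
--             num = int(id_str[i:i+2])
--             i += 2
--         else:
--             num = int(id_str[i])
--             i += 1
--         array.append(num)
--     return array
-- ===== SOURCE B (Python) =====
-- def _combine(ds):
--     if not ds:
--         return []
--     if ds[0] == 1 and len(ds) > 1:
--         return [10 + ds[1]] + _combine(ds[2:])
--     return [ds[0]] + _combine(ds[1:])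
--
--
-- def id_to_array(id_):
--     # pure integer arithmetic: extract decimal digits with divmod, no string round-trip
--     n = int(id_)
--     digits = []
--     if n == 0:
--         digits = [0]
--     while n > 0:
--         digits.append(n % 10)
--         n //= 10
--     digits.reverse()
--     return _combine(digits)
-- ===== Notes on version B (the rewrite author's own statement) =====
-- stated objective: alternative
-- what changed: B never builds the decimal string: it extracts the digits arithmetically with % and // and then merges a 1-digit with its successor by recursion on the digit list, instead of A's index-stepping scan over str(n) with int() re-parsing of each token.
import Mathlib
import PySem

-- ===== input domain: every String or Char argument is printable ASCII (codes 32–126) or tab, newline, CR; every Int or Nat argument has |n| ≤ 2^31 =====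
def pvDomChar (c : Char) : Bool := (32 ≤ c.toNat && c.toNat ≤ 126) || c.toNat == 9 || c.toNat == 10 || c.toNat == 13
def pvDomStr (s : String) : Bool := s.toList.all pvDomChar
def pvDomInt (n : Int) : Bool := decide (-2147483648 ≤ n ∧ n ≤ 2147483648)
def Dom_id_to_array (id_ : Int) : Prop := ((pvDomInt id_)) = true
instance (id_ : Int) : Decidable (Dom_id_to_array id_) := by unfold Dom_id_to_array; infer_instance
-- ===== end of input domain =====

-- B replaces A's index-stepping scan over str(n) (with int() re-parsing of each token) by
-- arithmetic digit extraction (% and //) plus a recursion that merges a 1-digit with its successor.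

-- ===== PORT A =====
-- A's while loop: i steps by 1 or 2 through id_str; fuel = len(id_str) bounds the number of
-- iterations (each iteration consumes at least one character, so it never runs out inside Pre_)
def idaLoop (s : List Char) (fuel : Nat) (i : Int) (acc : List Int) : List Int :=
  match fuel with
  | 0 => acc
  | fuel + 1 =>
    if i < PySem.List.len s then
      if PySem.List.pyGet? s i = some '1' then
        match PySem.Int.ofChars? (PySem.List.slice s (some i) (some (i + 2))) with
        | some num => idaLoop s fuel (i + 2) (acc ++ [num])
        | none => acc  -- ValueError: unreachable inside Pre_
      else
        match PySem.List.pyGet? s i with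
        | some c =>
          match PySem.Int.ofChars? [c] with
          | some num => idaLoop s fuel (i + 1) (acc ++ [num])
          | none => acc  -- ValueError: unreachable inside Pre_
        | none => acc    -- IndexError: unreachable (loop guard keeps i in range)
    else acc

def id_to_array (id_ : Int) : List Int :=
  let id_str := PySem.Int.toChars id_   -- str(int(id_)); int(id_) = id_
  idaLoop id_str id_str.length 0 []

-- ===== PORT B =====
-- B's while loop: digits appended least-significant first while n > 0
def idaDigitsRev (n : Int) : List Int :=
  if _h : 0 < n then
    PySem.Int.mod n 10 :: idaDigitsRev (PySem.Int.floordiv n 10)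
  else []
termination_by n.toNat
decreasing_by
  have h10 : PySem.Int.floordiv n 10 = n / 10 :=
    PySem.Int.floordiv_eq_ediv_of_pos (by omega)
  rw [h10]; omega

-- _combine: merge a leading 1 with the digit that follows it
def idaCombine : List Int → List Int
  | [] => []
  | [d] => [d]
  | d :: e :: rest => if d = 1 then (10 + e) :: idaCombine rest else d :: idaCombine (e :: rest)

def id_to_array_alt (id_ : Int) : List Int :=
  let n := id_
  -- digits = [0] if n == 0 (the while loop then does not run), else the appended digits
  let digits := (if n = 0 then [(0 : Int)] else []) ++ idaDigitsRev n
  idaCombine digits.reverse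

-- ===== PRECONDITION & SPEC =====
-- A raises ValueError for negative id_ (str(int(id_)) starts with '-', and int('-') fails),
-- so Pre_ keeps exactly the nonnegative inputs, on all of which A returns normally.
def Pre_id_to_array (id_ : Int) : Prop := 0 ≤ id_
instance (id_ : Int) : Decidable (Pre_id_to_array id_) := by unfold Pre_id_to_array; infer_instance
def pvWitness_id_to_array : Int := (123)

def Spec_id_to_array (id_ : Int) (out : List Int) : Prop := out = id_to_array_alt id_
instance (id_ : Int) (out : List Int) : Decidable (Spec_id_to_array id_ out) := by unfold Spec_id_to_array; infer_instance

-- ===== CLAIM (what is proved, stated in full; the proofs are below) =====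
def Claim_equal_id_to_array : Prop := ∀ (id_ : Int), Dom_id_to_array id_ → Pre_id_to_array id_ → Spec_id_to_array id_ (id_to_array id_)

-- ===== LEMMAS AND PROOFS =====

lemma idaLoop_exit (s : List Char) (fuel : Nat) (i : Int) (acc : List Int)
    (h : ¬ i < PySem.List.len s) : idaLoop s fuel i acc = acc := by
  cases fuel with
  | zero => rfl
  | succ f => rw [idaLoop, if_neg h]

-- characterisation of core's Nat.toDigitsCore through Nat.digits
lemma toDigitsCore_eq (f : Nat) : ∀ (n : Nat) (acc : List Char), 0 < f → n < 10 ^ f →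
    Nat.toDigitsCore 10 f n acc =
      (if n = 0 then ['0'] else ((Nat.digits 10 n).map Nat.digitChar).reverse) ++ acc := by
  induction f with
  | zero => intro n acc hf h; omega
  | succ f ih =>
    intro n acc hf h
    rw [Nat.toDigitsCore]
    by_cases h0 : n / 10 = 0
    · have hn10 : n < 10 := by omega
      simp only [h0]
      by_cases hz : n = 0
      · subst hz; simp; rfl
      · rw [if_neg hz, Nat.digits_def' (by norm_num : 1 < 10) (by omega), h0]
        simp [Nat.mod_eq_of_lt hn10]
    · have hn : n ≠ 0 := by omega
      have hf' : 0 < f := by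
        by_contra hc
        have : f = 0 := by omega
        subst this; simp at h; omega
      simp only [if_neg h0]
      rw [ih (n / 10) _ hf' (Nat.div_lt_of_lt_mul (by have hh := h; rw [pow_succ] at hh; omega))]
      have hd : Nat.digits 10 n = n % 10 :: Nat.digits 10 (n / 10) :=
        Nat.digits_def' (by norm_num : 1 < 10) (by omega)
      rw [if_neg h0, if_neg hn, hd]
      simp

-- str(n) for n ≥ 0 is the most-significant-first decimal digit characters
lemma toChars_nonneg (n : Int) (h : 0 ≤ n) :
    PySem.Int.toChars n =
      (if n.toNat = 0 then [0] else (Nat.digits 10 n.toNat).reverse).map Nat.digitChar := by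
  have hlt : ¬ n < 0 := by omega
  rw [PySem.Int.toChars, if_neg hlt, Nat.toDigits,
    toDigitsCore_eq _ _ _ (by omega) (lt_of_lt_of_le (Nat.lt_two_pow_self)
      (by gcongr <;> norm_num))]
  by_cases hz : n.toNat = 0 <;> first | (simp [hz]; rfl) | simp [hz]

-- B's while loop produces exactly Nat.digits (least significant first)
lemma idaDigitsRev_eq (n : Int) (h : 0 ≤ n) :
    idaDigitsRev n = (Nat.digits 10 n.toNat).map (fun d => (d : Int)) := by
  by_cases hp : 0 < n
  · have h1 : PySem.Int.mod n 10 = ((n.toNat % 10 : Nat) : Int) := by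
      rw [PySem.Int.mod_eq_emod_of_pos (show (0:Int) < 10 by norm_num)]; omega
    have h2 : (PySem.Int.floordiv n 10).toNat = n.toNat / 10 := by
      rw [PySem.Int.floordiv_eq_ediv_of_pos (show (0:Int) < 10 by norm_num)]; omega
    have hnn : 0 ≤ PySem.Int.floordiv n 10 := by
      rw [PySem.Int.floordiv_eq_ediv_of_pos (show (0:Int) < 10 by norm_num)]; omega
    rw [idaDigitsRev, dif_pos hp, h1, idaDigitsRev_eq _ hnn, h2]
    conv_rhs => rw [Nat.digits_def' (by norm_num : 1 < 10) (by omega)]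
    simp
  · have : n = 0 := by omega
    subst this
    rw [idaDigitsRev]
    simp
termination_by n.toNat
decreasing_by
  have h10 : PySem.Int.floordiv n 10 = n / 10 :=
    PySem.Int.floordiv_eq_ediv_of_pos (by omega)
  rw [h10]; omega

lemma digitChar_eq_one_iff (d : Nat) (h : d < 10) : Nat.digitChar d = '1' ↔ d = 1 := by
  interval_cases d <;> simp <;> decide

lemma ofChars_digitChar (d : Nat) (h : d < 10) :
    PySem.Int.ofChars? [Nat.digitChar d] = some (d : Int) := by
  interval_cases d <;> decide

lemma ofChars_one_digitChar (e : Nat) (h : e < 10) :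
    PySem.Int.ofChars? ['1', Nat.digitChar e] = some ((10 + e : Nat) : Int) := by
  interval_cases e <;> decide

-- the heart: A's scan over the digit characters computes B's _combine of the digit values
lemma idaLoop_combine (fuel : Nat) : ∀ (ds : List Nat) (pre : List Char) (acc : List Int),
    (∀ d ∈ ds, d < 10) → ds.length ≤ fuel →
    idaLoop (pre ++ ds.map Nat.digitChar) fuel ((pre.length : Nat) : Int) acc
      = acc ++ idaCombine (ds.map (fun d => (d : Int))) := by
  induction fuel with
  | zero =>
    intro ds pre acc hd hl
    have : ds = [] := by
      cases ds with
      | nil => rfl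
      | cons a t => simp at hl
    subst this
    simp [idaCombine, idaLoop]
  | succ f ih =>
    intro ds pre acc hd hl
    cases ds with
    | nil =>
      rw [idaLoop_exit]
      · simp [idaCombine]
      · simp
    | cons d rest =>
      have hd0 : d < 10 := hd d (by simp)
      have hguard : ((pre.length : Nat) : Int) < PySem.List.len (pre ++ (d :: rest).map Nat.digitChar) := by
        simp
      rw [idaLoop, if_pos hguard]
      have hget : PySem.List.pyGet? (pre ++ (d :: rest).map Nat.digitChar) ((pre.length : Nat) : Int)
          = some (Nat.digitChar d) := by
        rw [List.map_cons]
        exact PySem.List.pyGet?_append_length pre _ _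
      by_cases h1 : d = 1
      · subst h1
        rw [if_pos (show _ = some '1' by rw [hget]; rfl)]
        cases rest with
        | nil =>
          have hslice : PySem.List.slice (pre ++ [Nat.digitChar 1])
              (some ((pre.length : Nat) : Int)) (some (((pre.length : Nat) : Int) + 2))
              = [Nat.digitChar 1] := by
            rw [show ((2:Int)) = ((2:Nat):Int) from rfl, PySem.List.slice_natCast_add,
              List.drop_left]
            rfl
          simp only [List.map_cons, List.map_nil, hslice,
            show PySem.Int.ofChars? [Nat.digitChar 1] = some (1 : Int) from by decide]
          rw [idaLoop_exit _ _ _ _ (by simp)]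
          simp [idaCombine]
        | cons e rest' =>
          have he : e < 10 := hd e (by simp)
          have hslice : PySem.List.slice (pre ++ '1' :: Nat.digitChar e :: rest'.map Nat.digitChar)
              (some ((pre.length : Nat) : Int)) (some (((pre.length : Nat) : Int) + 2))
              = ['1', Nat.digitChar e] := by
            rw [show ((2:Int)) = ((2:Nat):Int) from rfl, PySem.List.slice_natCast_add,
              List.drop_left]
            rfl
          simp only [List.map_cons, show Nat.digitChar 1 = '1' from rfl, hslice,
            ofChars_one_digitChar e he]
          have hre : pre ++ '1' :: Nat.digitChar e :: rest'.map Nat.digitChar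
              = (pre ++ ['1', Nat.digitChar e]) ++ rest'.map Nat.digitChar := by simp
          have hidx : ((pre.length : Nat) : Int) + 2
              = (((pre ++ ['1', Nat.digitChar e]).length : Nat) : Int) := by
            simp only [List.length_append, List.length_cons, List.length_nil]
            push_cast
            ring
          rw [hre, hidx,
            ih rest' (pre ++ ['1', Nat.digitChar e]) _ (fun x hx => hd x (by simp [hx]))
              (by simp at hl ⊢; omega)]
          simp [idaCombine]
      · rw [if_neg (by
          rw [hget]
          simp only [Option.some.injEq]
          exact fun hc => h1 ((digitChar_eq_one_iff d hd0).mp hc))]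
        simp only [hget, ofChars_digitChar d hd0]
        have hidx : ((pre.length : Nat) : Int) + 1
            = (((pre ++ [Nat.digitChar d]).length : Nat) : Int) := by
          simp only [List.length_append, List.length_cons, List.length_nil]
          push_cast
          ring
        have hre : pre ++ Nat.digitChar d :: rest.map Nat.digitChar
            = (pre ++ [Nat.digitChar d]) ++ rest.map Nat.digitChar := by simp
        rw [List.map_cons, hre, hidx,
          ih rest (pre ++ [Nat.digitChar d]) _ (fun x hx => hd x (by simp [hx]))
            (by simp at hl ⊢; omega)]
        have hne : ((d : Nat) : Int) ≠ 1 := by omega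
        cases rest with
        | nil => simp [idaCombine]
        | cons e r => simp [idaCombine, hne]

-- ===== VERDICT (by name: the statement is the Claim_ definition above) =====
theorem id_to_array_spec : Claim_equal_id_to_array := by
  intro id_ _hdom hpre
  unfold Spec_id_to_array
  have hpre' : (0:Int) ≤ id_ := hpre
  -- the most-significant-first digit list
  set D : List Nat := if id_.toNat = 0 then [0] else (Nat.digits 10 id_.toNat).reverse with hD
  have hdig : ∀ d ∈ D, d < 10 := by
    intro d hdmem
    rw [hD] at hdmem
    by_cases hz : id_.toNat = 0
    · rw [if_pos hz] at hdmem; simp at hdmem; omega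
    · rw [if_neg hz] at hdmem
      exact Nat.digits_lt_base (by norm_num) (List.mem_reverse.mp hdmem)
  -- A's side
  have hA : id_to_array id_ = idaCombine (D.map (fun d => (d : Int))) := by
    show idaLoop (PySem.Int.toChars id_) (PySem.Int.toChars id_).length 0 [] = _
    rw [toChars_nonneg id_ hpre', ← hD]
    have h0 : (0 : Int) = (((List.nil : List Char).length : Nat) : Int) := by simp
    rw [List.length_map, h0,
      show D.map Nat.digitChar = [] ++ D.map Nat.digitChar from rfl,
      idaLoop_combine D.length D [] [] hdig (by simp)]
    simp
  -- B's side
  have hB : id_to_array_alt id_ = idaCombine (D.map (fun d => (d : Int))) := by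
    show idaCombine ((if id_ = 0 then [(0:Int)] else []) ++ idaDigitsRev id_).reverse = _
    rw [idaDigitsRev_eq id_ hpre', hD]
    by_cases hz : id_ = 0
    · subst hz; simp
    · rw [if_neg hz, if_neg (by omega)]
      congr 1
      simp [← List.map_eq_flatMap, List.map_reverse]
  rw [hA, hB]
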